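-- pv_equiv track=rewrite | github.com/Kxd395/Spec-Kit-Rehabilitation | src/specify_cli/commands/audit.py | _gate_code
-- ===== SOURCE A (Python) =====
-- def _gate_code(findings, threshold: str) -> int:
--     """Check if findings exceed severity threshold.
--
--     Args:
--         findings: List of finding dictionaries
--         threshold: Severity threshold (HIGH, MEDIUM, LOW)
--
--     Returns:
--         1 if threshold exceeded, 0 otherwise
--     """
--     sev = [str(f.get("severity", "")).upper() for f in findings]
--     high = sev.count("HIGH") + sev.count("CRITICAL")
--     med = sev.count("MEDIUM")
--     low = sev.count("LOW")
--     t = threshold.upper()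
--     if t == "HIGH" and high > 0:
--         return 1
--     if t == "MEDIUM" and (high + med) > 0:
--         return 1
--     if t == "LOW" and (high + med + low) > 0:
--         return 1
--     return 0
-- ===== SOURCE B (Python) =====
-- def _gate_code(findings, threshold: str) -> int:
--     """Check if findings exceed severity threshold (rank-based)."""
--     ranks = {"LOW": 1, "MEDIUM": 2, "HIGH": 3, "CRITICAL": 3}
--     sev_ranks = [ranks.get(str(f.get("severity", "")).upper(), 0) for f in findings]
--     t_rank = {"LOW": 1, "MEDIUM": 2, "HIGH": 3}.get(threshold.upper())
--     if t_rank is None: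
--         return 0
--     return 1 if any(r >= t_rank for r in sev_ranks) else 0
-- ===== Notes on version B (the rewrite author's own statement) =====
-- stated objective: simpler
-- what changed: Replaced the four .count() passes and the threshold if-cascade by mapping every severity (and the threshold) to a numeric rank and comparing ranks once.
import Mathlib
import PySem

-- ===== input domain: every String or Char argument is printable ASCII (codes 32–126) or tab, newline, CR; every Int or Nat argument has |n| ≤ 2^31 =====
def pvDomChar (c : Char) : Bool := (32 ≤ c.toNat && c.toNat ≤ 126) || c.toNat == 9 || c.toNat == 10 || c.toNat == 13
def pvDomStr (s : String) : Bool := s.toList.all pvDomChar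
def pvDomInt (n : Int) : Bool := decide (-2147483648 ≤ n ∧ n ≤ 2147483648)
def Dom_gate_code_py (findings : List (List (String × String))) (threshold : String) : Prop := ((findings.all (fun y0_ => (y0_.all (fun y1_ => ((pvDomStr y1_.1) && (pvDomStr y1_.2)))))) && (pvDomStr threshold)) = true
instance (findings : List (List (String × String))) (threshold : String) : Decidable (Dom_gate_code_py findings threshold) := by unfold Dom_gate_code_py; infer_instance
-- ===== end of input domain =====

-- B is a simpler decomposition: severities and threshold are mapped to numeric ranks and compared once,
-- instead of A's four count() passes and if-cascade. Return-value equivalence is proved for all inputs.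

-- ===== PORT A =====
def gate_code_py (findings : List (List (String × String))) (threshold : String) : Int :=
  let sev := findings.map (fun f => PySem.Str.upper ((PySem.Dict.mk f).getD "severity" ""))
  let high := sev.count "HIGH" + sev.count "CRITICAL"
  let med := sev.count "MEDIUM"
  let low := sev.count "LOW"
  let t := PySem.Str.upper threshold
  if t = "HIGH" ∧ 0 < high then 1
  else if t = "MEDIUM" ∧ 0 < high + med then 1
  else if t = "LOW" ∧ 0 < high + med + low then 1
  else 0

-- ===== PORT B =====
def pvRanks : PySem.Dict String Int :=
  PySem.Dict.mk [("LOW", 1), ("MEDIUM", 2), ("HIGH", 3), ("CRITICAL", 3)]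

def pvThresholdRanks : PySem.Dict String Int :=
  PySem.Dict.mk [("LOW", 1), ("MEDIUM", 2), ("HIGH", 3)]

def gate_code_py_alt (findings : List (List (String × String))) (threshold : String) : Int :=
  let sevRanks := findings.map (fun f =>
    pvRanks.getD (PySem.Str.upper ((PySem.Dict.mk f).getD "severity" "")) 0)
  match pvThresholdRanks.get? (PySem.Str.upper threshold) with
  | none => 0
  | some tr => if sevRanks.any (fun r => tr ≤ r) then 1 else 0

-- ===== PRECONDITION & SPEC =====
def Spec_gate_code_py (findings : List (List (String × String))) (threshold : String) (out : Int) : Prop := out = gate_code_py_alt findings threshold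
instance (findings : List (List (String × String))) (threshold : String) (out : Int) : Decidable (Spec_gate_code_py findings threshold out) := by unfold Spec_gate_code_py; infer_instance

-- ===== CLAIM (what is proved, stated in full; the proofs are below) =====
def Claim_equal_gate_code_py : Prop := ∀ (findings : List (List (String × String))) (threshold : String), Dom_gate_code_py findings threshold → Spec_gate_code_py findings threshold (gate_code_py findings threshold)

-- ===== LEMMAS AND PROOFS =====

-- rank classification of pvRanks.getD
lemma rank_ge_three (s : String) :
    (3 ≤ pvRanks.getD s 0) ↔ (s = "HIGH" ∨ s = "CRITICAL") := by
  simp only [pvRanks, PySem.Dict.getD, PySem.Dict.get?_mk_cons]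
  split_ifs with h1 h2 h3 h4
  · rw [← eq_of_beq h1]; decide
  · rw [← eq_of_beq h2]; decide
  · rw [← eq_of_beq h3]; decide
  · rw [← eq_of_beq h4]; decide
  · rw [show (PySem.Dict.mk ([] : List (String × Int))).get? s = none from rfl]
    simp only [Option.getD_none]
    constructor
    · intro h; omega
    · rintro (rfl | rfl) <;> simp_all

lemma rank_ge_two (s : String) :
    (2 ≤ pvRanks.getD s 0) ↔ (s = "HIGH" ∨ s = "CRITICAL" ∨ s = "MEDIUM") := by
  simp only [pvRanks, PySem.Dict.getD, PySem.Dict.get?_mk_cons]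
  split_ifs with h1 h2 h3 h4
  · rw [← eq_of_beq h1]; decide
  · rw [← eq_of_beq h2]; decide
  · rw [← eq_of_beq h3]; decide
  · rw [← eq_of_beq h4]; decide
  · rw [show (PySem.Dict.mk ([] : List (String × Int))).get? s = none from rfl]
    simp only [Option.getD_none]
    constructor
    · intro h; omega
    · rintro (rfl | rfl | rfl) <;> simp_all

lemma rank_ge_one (s : String) :
    (1 ≤ pvRanks.getD s 0) ↔ (s = "HIGH" ∨ s = "CRITICAL" ∨ s = "MEDIUM" ∨ s = "LOW") := by
  simp only [pvRanks, PySem.Dict.getD, PySem.Dict.get?_mk_cons]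
  split_ifs with h1 h2 h3 h4
  · rw [← eq_of_beq h1]; decide
  · rw [← eq_of_beq h2]; decide
  · rw [← eq_of_beq h3]; decide
  · rw [← eq_of_beq h4]; decide
  · rw [show (PySem.Dict.mk ([] : List (String × Int))).get? s = none from rfl]
    simp only [Option.getD_none]
    constructor
    · intro h; omega
    · rintro (rfl | rfl | rfl | rfl) <;> simp_all

-- "some finding has rank ≥ tr" ↔ "the corresponding counts are positive"
lemma any_rank_counts (sev : List String) (tr : Int)
    (P : String → Prop) [DecidablePred P]
    (hP : ∀ s, (tr ≤ pvRanks.getD s 0) ↔ P s) :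
    (sev.any (fun s => decide (tr ≤ pvRanks.getD s 0)) = true) ↔ ∃ s ∈ sev, P s := by
  simp [List.any_eq_true, hP]

-- positivity of the relevant counts, stated as "some element satisfies"
lemma exists_counts2 (sev : List String) :
    (∃ s ∈ sev, s = "HIGH" ∨ s = "CRITICAL") ↔ 0 < sev.count "HIGH" + sev.count "CRITICAL" := by
  constructor
  · rintro ⟨s, hs, rfl | rfl⟩ <;> (have := List.count_pos_iff.mpr hs; omega)
  · intro h
    by_cases hH : 0 < sev.count "HIGH"
    · exact ⟨"HIGH", List.count_pos_iff.mp hH, Or.inl rfl⟩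
    · have : 0 < sev.count "CRITICAL" := by omega
      exact ⟨"CRITICAL", List.count_pos_iff.mp this, Or.inr rfl⟩

lemma exists_counts3 (sev : List String) :
    (∃ s ∈ sev, s = "HIGH" ∨ s = "CRITICAL" ∨ s = "MEDIUM") ↔
      0 < sev.count "HIGH" + sev.count "CRITICAL" + sev.count "MEDIUM" := by
  constructor
  · rintro ⟨s, hs, rfl | rfl | rfl⟩ <;> (have := List.count_pos_iff.mpr hs; omega)
  · intro h
    by_cases hM : 0 < sev.count "MEDIUM"
    · exact ⟨"MEDIUM", List.count_pos_iff.mp hM, Or.inr (Or.inr rfl)⟩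
    · have h2 : 0 < sev.count "HIGH" + sev.count "CRITICAL" := by omega
      obtain ⟨s, hs, hor⟩ := (exists_counts2 sev).mpr h2
      exact ⟨s, hs, hor.elim Or.inl (Or.inr ∘ Or.inl)⟩

lemma exists_counts4 (sev : List String) :
    (∃ s ∈ sev, s = "HIGH" ∨ s = "CRITICAL" ∨ s = "MEDIUM" ∨ s = "LOW") ↔
      0 < sev.count "HIGH" + sev.count "CRITICAL" + sev.count "MEDIUM" + sev.count "LOW" := by
  constructor
  · rintro ⟨s, hs, rfl | rfl | rfl | rfl⟩ <;> (have := List.count_pos_iff.mpr hs; omega)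
  · intro h
    by_cases hL : 0 < sev.count "LOW"
    · exact ⟨"LOW", List.count_pos_iff.mp hL, Or.inr (Or.inr (Or.inr rfl))⟩
    · have h3 : 0 < sev.count "HIGH" + sev.count "CRITICAL" + sev.count "MEDIUM" := by omega
      obtain ⟨s, hs, hor⟩ := (exists_counts3 sev).mpr h3
      refine ⟨s, hs, ?_⟩
      rcases hor with h' | h' | h'
      · exact Or.inl h'
      · exact Or.inr (Or.inl h')
      · exact Or.inr (Or.inr (Or.inl h'))

lemma core (sev : List String) (t : String) :
    (if t = "HIGH" ∧ 0 < sev.count "HIGH" + sev.count "CRITICAL" then (1 : Int)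
     else if t = "MEDIUM" ∧ 0 < sev.count "HIGH" + sev.count "CRITICAL" + sev.count "MEDIUM" then 1
     else if t = "LOW" ∧ 0 < sev.count "HIGH" + sev.count "CRITICAL" + sev.count "MEDIUM" + sev.count "LOW" then 1
     else 0)
    = match pvThresholdRanks.get? t with
      | none => 0
      | some tr => if (sev.map (fun s => pvRanks.getD s 0)).any (fun r => tr ≤ r) then 1 else 0 := by
  have hA : (sev.any (fun s => decide ((3:Int) ≤ pvRanks.getD s 0)) = true)
      ↔ 0 < sev.count "HIGH" + sev.count "CRITICAL" := by
    rw [any_rank_counts sev 3 _ rank_ge_three]; exact exists_counts2 sev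
  have hB : (sev.any (fun s => decide ((2:Int) ≤ pvRanks.getD s 0)) = true)
      ↔ 0 < sev.count "HIGH" + sev.count "CRITICAL" + sev.count "MEDIUM" := by
    rw [any_rank_counts sev 2 _ rank_ge_two]; exact exists_counts3 sev
  have hC : (sev.any (fun s => decide ((1:Int) ≤ pvRanks.getD s 0)) = true)
      ↔ 0 < sev.count "HIGH" + sev.count "CRITICAL" + sev.count "MEDIUM" + sev.count "LOW" := by
    rw [any_rank_counts sev 1 _ rank_ge_one]; exact exists_counts4 sev
  by_cases h1 : t = "HIGH"
  · subst h1
    rw [show pvThresholdRanks.get? "HIGH" = some 3 from rfl]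
    simp only [List.any_map, Function.comp_def]
    by_cases h : 0 < sev.count "HIGH" + sev.count "CRITICAL"
    · rw [if_pos ⟨by trivial, h⟩, if_pos (hA.mpr h)]
    · have hb : (sev.any fun s => decide ((3:Int) ≤ pvRanks.getD s 0)) = false := by
        cases hb : sev.any fun s => decide ((3:Int) ≤ pvRanks.getD s 0)
        · rfl
        · exact absurd (hA.mp hb) h
      rw [if_neg (fun hc => h hc.2),
          if_neg (fun hc => absurd hc.1 (by decide)),
          if_neg (fun hc => absurd hc.1 (by decide)), hb]
      simp
  · by_cases h2 : t = "MEDIUM"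
    · subst h2
      rw [show pvThresholdRanks.get? "MEDIUM" = some 2 from rfl]
      simp only [List.any_map, Function.comp_def]
      by_cases h : 0 < sev.count "HIGH" + sev.count "CRITICAL" + sev.count "MEDIUM"
      · rw [if_neg (fun hc => absurd hc.1 (by decide)), if_pos ⟨by trivial, h⟩, if_pos (hB.mpr h)]
      · have hb : (sev.any fun s => decide ((2:Int) ≤ pvRanks.getD s 0)) = false := by
          cases hb : sev.any fun s => decide ((2:Int) ≤ pvRanks.getD s 0)
          · rfl
          · exact absurd (hB.mp hb) h
        rw [if_neg (fun hc => absurd hc.1 (by decide)),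
            if_neg (fun hc => h hc.2),
            if_neg (fun hc => absurd hc.1 (by decide)), hb]
        simp
    · by_cases h3 : t = "LOW"
      · subst h3
        rw [show pvThresholdRanks.get? "LOW" = some 1 from rfl]
        simp only [List.any_map, Function.comp_def]
        by_cases h : 0 < sev.count "HIGH" + sev.count "CRITICAL" + sev.count "MEDIUM" + sev.count "LOW"
        · rw [if_neg (fun hc => absurd hc.1 (by decide)),
              if_neg (fun hc => absurd hc.1 (by decide)), if_pos ⟨by trivial, h⟩, if_pos (hC.mpr h)]
        · have hb : (sev.any fun s => decide ((1:Int) ≤ pvRanks.getD s 0)) = false := by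
            cases hb : sev.any fun s => decide ((1:Int) ≤ pvRanks.getD s 0)
            · rfl
            · exact absurd (hC.mp hb) h
          rw [if_neg (fun hc => absurd hc.1 (by decide)),
              if_neg (fun hc => absurd hc.1 (by decide)),
              if_neg (fun hc => h hc.2), hb]
          simp
      · have hnone : pvThresholdRanks.get? t = none := by
          simp only [pvThresholdRanks, PySem.Dict.get?_mk_cons, beq_iff_eq,
            if_neg (Ne.symm h1), if_neg (Ne.symm h2), if_neg (Ne.symm h3)]
          rfl
        rw [hnone, if_neg (fun hc => h1 hc.1), if_neg (fun hc => h2 hc.1),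
            if_neg (fun hc => h3 hc.1)]

-- ===== VERDICT (by name: the statement is the Claim_ definition above) =====
theorem gate_code_py_spec : Claim_equal_gate_code_py := by
  intro findings threshold _
  unfold Spec_gate_code_py gate_code_py gate_code_py_alt
  have h := core (findings.map fun f => PySem.Str.upper ((PySem.Dict.mk f).getD "severity" "")) (PySem.Str.upper threshold)
  rw [List.map_map] at h
  simp only [Function.comp_def] at h
  exact h
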